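-- pv_equiv track=rewrite | github.com/OlhaBas/2024Python_lec_lab | Homework1/Task0.py | max_of_numbers_once_in_matrix
-- ===== SOURCE A (Python) =====
-- def max_of_numbers_once_in_matrix(matrix):
--     counts = {} # хеш таблицы, наши любимые
--     max_repeated = None
--
--     # Подсчитываем количество встреч каждого числа в матрице
--     for row in matrix:
--         for num in row:
--             counts[num] = counts.get(num, 0) + 1
--
--     # Находим максимальное число встречающееся более одного раза
--     for num, count in counts.items():
--         if count > 1:
--             if max_repeated is None or num > max_repeated:
--                 max_repeated = num
--
--     return max_repeated
-- ===== SOURCE B (Python) =====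
-- def max_of_numbers_once_in_matrix(matrix):
--     # flatten, sort descending, return the first adjacently-repeated value
--     flat = sorted((num for row in matrix for num in row), reverse=True)
--     for a, b in zip(flat, flat[1:]):
--         if a == b:
--             return a
--     return None
-- ===== Notes on version B (the rewrite author's own statement) =====
-- stated objective: alternative
-- what changed: Replaces the count-dictionary plus max-scan over dict items by flatten + descending sort + one adjacent-pair scan that returns the first repeated value.
import Mathlib
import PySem

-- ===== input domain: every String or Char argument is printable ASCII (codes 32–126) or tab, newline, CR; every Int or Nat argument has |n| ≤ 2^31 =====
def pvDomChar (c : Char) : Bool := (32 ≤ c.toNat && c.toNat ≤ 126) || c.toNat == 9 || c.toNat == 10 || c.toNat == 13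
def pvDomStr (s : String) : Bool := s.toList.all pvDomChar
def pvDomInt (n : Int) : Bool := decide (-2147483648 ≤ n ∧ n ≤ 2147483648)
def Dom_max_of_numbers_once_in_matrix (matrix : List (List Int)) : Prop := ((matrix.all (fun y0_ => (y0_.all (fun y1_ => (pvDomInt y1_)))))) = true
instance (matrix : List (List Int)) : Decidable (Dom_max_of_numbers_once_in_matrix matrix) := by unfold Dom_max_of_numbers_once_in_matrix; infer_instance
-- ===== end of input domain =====

-- B replaces A's count-dictionary and dict-items max scan by flatten + descending sort +
-- one adjacent-pair scan returning the first repeated value (objective: alternative).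

-- ===== PORT A =====
def max_of_numbers_once_in_matrix (matrix : List (List Int)) : Option Int :=
  let counts : PySem.Dict Int Int :=
    matrix.foldl (fun counts row =>
      row.foldl (fun counts num => counts.insert num (counts.getD num 0 + 1)) counts)
      PySem.Dict.empty
  counts.items.foldl (fun maxRepeated (p : Int × Int) =>
    if p.2 > 1 then
      match maxRepeated with
      | none => some p.1
      | some m => if p.1 > m then some p.1 else maxRepeated
    else maxRepeated) none

-- ===== PORT B =====
-- the 'for a, b in zip(flat, flat[1:])' scan of Source B
def pvFirstAdjDup : List Int → Option Int
  | a :: b :: t => if a = b then some a else pvFirstAdjDup (b :: t)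
  | _ => none

def max_of_numbers_once_in_matrix_alt (matrix : List (List Int)) : Option Int :=
  pvFirstAdjDup (PySem.List.sorted matrix.flatten (fun x => x) true)

-- ===== PRECONDITION & SPEC =====
def Spec_max_of_numbers_once_in_matrix (matrix : List (List Int)) (out : Option Int) : Prop := out = max_of_numbers_once_in_matrix_alt matrix
instance (matrix : List (List Int)) (out : Option Int) : Decidable (Spec_max_of_numbers_once_in_matrix matrix out) := by unfold Spec_max_of_numbers_once_in_matrix; infer_instance

-- ===== CLAIM (what is proved, stated in full; the proofs are below) =====
def Claim_equal_max_of_numbers_once_in_matrix : Prop := ∀ (matrix : List (List Int)), Dom_max_of_numbers_once_in_matrix matrix → Spec_max_of_numbers_once_in_matrix matrix (max_of_numbers_once_in_matrix matrix)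

-- ===== LEMMAS AND PROOFS =====

-- A's running-max-with-None accumulator
def pvAmax (b : Option Int) (l : List Int) : Option Int :=
  l.foldl (fun best k =>
    match best with
    | none => some k
    | some m => if k > m then some k else best) b

lemma pvAmax_some (a : Int) (l : List Int) : pvAmax (some a) l = some (l.foldl max a) := by
  induction l generalizing a with
  | nil => rfl
  | cons x t ih =>
    simp only [pvAmax, List.foldl] at *
    rcases lt_or_ge a x with h | h
    · simp [h, ih, max_eq_right h.le]
    · simp [not_lt.mpr h, ih, max_eq_left h]

lemma pvAmax_none_eq_none_iff (l : List Int) : pvAmax none l = none ↔ l = [] := by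
  cases l with
  | nil => simp [pvAmax]
  | cons x t =>
    have : pvAmax none (x :: t) = pvAmax (some x) t := rfl
    simp [this, pvAmax_some]

lemma pvAmax_none_eq_some_iff (l : List Int) (m : Int) :
    pvAmax none l = some m ↔ m ∈ l ∧ ∀ x ∈ l, x ≤ m := by
  cases l with
  | nil => simp [pvAmax]
  | cons x t =>
    have hx : pvAmax none (x :: t) = some (t.foldl max x) := by
      have : pvAmax none (x :: t) = pvAmax (some x) t := rfl
      rw [this, pvAmax_some]
    rw [hx]
    constructor
    · rintro h
      have hm : m = t.foldl max x := by simpa using h.symm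
      subst hm
      refine ⟨?_, ?_⟩
      · rcases PySem.List.foldl_max_mem t x with h | h
        · rw [h]; exact List.mem_cons_self
        · exact List.mem_cons_of_mem _ h
      · intro y hy
        rcases List.mem_cons.mp hy with rfl | hy
        · exact (PySem.List.le_foldl_max t y).1
        · exact (PySem.List.le_foldl_max t x).2 y hy
    · rintro ⟨hm, hall⟩
      have h1 : t.foldl max x ≤ m := by
        rcases PySem.List.foldl_max_mem t x with h | h
        · rw [h]; exact hall x List.mem_cons_self
        · exact hall _ (List.mem_cons_of_mem _ h)
      have h2 : m ≤ t.foldl max x := by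
        rcases List.mem_cons.mp hm with rfl | hm
        · exact (PySem.List.le_foldl_max t m).1
        · exact (PySem.List.le_foldl_max t x).2 m hm
      rw [le_antisymm h1 h2]

-- A's result as pvAmax over the distinct keys whose count exceeds 1
lemma A_eq_pvAmax (matrix : List (List Int)) :
    max_of_numbers_once_in_matrix matrix =
      pvAmax none ((PySem.Set.ofList matrix.flatten).filter
        (fun k => decide ((1 : Int) < (matrix.flatten.count k : Int)))) := by
  unfold max_of_numbers_once_in_matrix pvAmax
  rw [← List.foldl_flatten, PySem.Dict.foldl_insert_getD_add_one_eq_counter,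
      List.foldl_filter]
  simp only [PySem.Dict.items_counter, List.foldl_map]
  simp

lemma A_none_iff (matrix : List (List Int)) :
    max_of_numbers_once_in_matrix matrix = none ↔
      ∀ x : Int, matrix.flatten.count x ≤ 1 := by
  rw [A_eq_pvAmax, pvAmax_none_eq_none_iff, List.filter_eq_nil_iff]
  simp only [PySem.Set.mem_ofList, decide_eq_true_eq]
  constructor
  · intro h x
    by_contra hx
    exact h x (List.count_pos_iff.mp (by omega))
      (by exact_mod_cast (by omega : 1 < matrix.flatten.count x))
  · intro h x _ hc
    have hc' : 1 < matrix.flatten.count x := by exact_mod_cast hc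
    exact absurd hc' (by have := h x; omega)

lemma A_some_iff (matrix : List (List Int)) (m : Int) :
    max_of_numbers_once_in_matrix matrix = some m ↔
      (1 < matrix.flatten.count m ∧ ∀ x : Int, 1 < matrix.flatten.count x → x ≤ m) := by
  rw [A_eq_pvAmax, pvAmax_none_eq_some_iff]
  simp only [List.mem_filter, PySem.Set.mem_ofList, decide_eq_true_eq]
  constructor
  · rintro ⟨⟨_, hc⟩, hall⟩
    refine ⟨by exact_mod_cast hc, ?_⟩
    intro x hx
    exact hall x ⟨List.count_pos_iff.mp (by omega), by exact_mod_cast hx⟩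
  · rintro ⟨hc, hall⟩
    refine ⟨⟨List.count_pos_iff.mp (by omega), by exact_mod_cast hc⟩, ?_⟩
    rintro x ⟨_, hx2⟩
    exact hall x (by exact_mod_cast hx2)

-- B's scan on a descending list finds exactly the maximal repeated value
lemma pvFirstAdjDup_char (s : List Int) (hs : s.Pairwise (fun a b => b ≤ a)) :
    (pvFirstAdjDup s = none → ∀ x : Int, s.count x ≤ 1) ∧
    (∀ m : Int, pvFirstAdjDup s = some m →
      1 < s.count m ∧ ∀ x : Int, 1 < s.count x → x ≤ m) := by
  induction s with
  | nil => exact ⟨fun _ x => by simp, fun m hm => by simp [pvFirstAdjDup] at hm⟩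
  | cons a s ih =>
    cases s with
    | nil =>
      refine ⟨fun _ x => ?_, fun m hm => by simp [pvFirstAdjDup] at hm⟩
      simp [List.count_cons]
      split <;> omega
    | cons b t =>
      have ha : ∀ y ∈ b :: t, y ≤ a := fun y hy => (List.pairwise_cons.mp hs).1 y hy
      have hp' : (b :: t).Pairwise (fun a b => b ≤ a) := (List.pairwise_cons.mp hs).2
      by_cases hab : a = b
      · subst hab
        refine ⟨fun hn => by simp [pvFirstAdjDup] at hn, fun m hm => ?_⟩
        obtain rfl : m = a := ((by simpa [pvFirstAdjDup] using hm : a = m)).symm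
        refine ⟨by simp, fun x hx => ?_⟩
        have hxmem : x ∈ m :: m :: t := List.count_pos_iff.mp (by omega)
        rcases List.mem_cons.mp hxmem with rfl | hx'
        · exact le_refl x
        · exact ha x hx'
      · have hstep : pvFirstAdjDup (a :: b :: t) = pvFirstAdjDup (b :: t) := by
          simp [pvFirstAdjDup, hab]
        have hanot : a ∉ b :: t := by
          intro hmem
          rcases List.mem_cons.mp hmem with h | h
          · exact hab h
          · have h1 : a ≤ b := (List.pairwise_cons.mp hp').1 a h
            have h2 : b ≤ a := ha b List.mem_cons_self
            exact hab (le_antisymm h1 h2)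
        have hca : (b :: t).count a = 0 := List.count_eq_zero.mpr hanot
        have hc : ∀ x : Int, (a :: b :: t).count x =
            (b :: t).count x + (if a = x then 1 else 0) := by
          intro x
          simp [List.count_cons]
        have IH := ih hp'
        constructor
        · intro hn x
          rw [hstep] at hn
          have hx := IH.1 hn x
          rw [hc x]
          by_cases hxa : a = x
          · subst hxa; rw [hca]; simp
          · simp [hxa]; omega
        · intro m hm
          rw [hstep] at hm
          obtain ⟨h1, h2⟩ := IH.2 m hm
          refine ⟨by rw [hc m]; split <;> omega, fun x hx => ?_⟩
          rw [hc x] at hx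
          by_cases hxa : a = x
          · subst hxa; simp [hca] at hx
          · simp [hxa] at hx; exact h2 x hx

lemma B_none_iff (matrix : List (List Int)) :
    max_of_numbers_once_in_matrix_alt matrix = none ↔
      ∀ x : Int, matrix.flatten.count x ≤ 1 := by
  unfold max_of_numbers_once_in_matrix_alt
  have hperm : (PySem.List.sorted matrix.flatten (fun x => x) true).Perm matrix.flatten :=
    PySem.List.sorted_perm matrix.flatten (fun x => x) true
  have hchar := pvFirstAdjDup_char (PySem.List.sorted matrix.flatten (fun x => x) true)
    (PySem.List.sorted_pairwise_rev matrix.flatten (fun x => x))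
  constructor
  · intro h x
    rw [← hperm.count_eq x]
    exact hchar.1 h x
  · intro h
    cases heq : pvFirstAdjDup (PySem.List.sorted matrix.flatten (fun x => x) true) with
    | none => rfl
    | some m =>
      have h1 := (hchar.2 m heq).1
      rw [hperm.count_eq m] at h1
      exact absurd h1 (by have := h m; omega)

lemma B_some (matrix : List (List Int)) (m : Int) :
    max_of_numbers_once_in_matrix_alt matrix = some m →
      1 < matrix.flatten.count m ∧ ∀ x : Int, 1 < matrix.flatten.count x → x ≤ m := by
  intro hB
  unfold max_of_numbers_once_in_matrix_alt at hB
  have hperm : (PySem.List.sorted matrix.flatten (fun x => x) true).Perm matrix.flatten :=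
    PySem.List.sorted_perm matrix.flatten (fun x => x) true
  have hchar := pvFirstAdjDup_char (PySem.List.sorted matrix.flatten (fun x => x) true)
    (PySem.List.sorted_pairwise_rev matrix.flatten (fun x => x))
  obtain ⟨h1, h2⟩ := hchar.2 m hB
  refine ⟨by rw [← hperm.count_eq m]; exact h1, fun x hx => ?_⟩
  exact h2 x (by rw [hperm.count_eq x]; exact hx)

-- ===== VERDICT (by name: the statement is the Claim_ definition above) =====
theorem max_of_numbers_once_in_matrix_spec : Claim_equal_max_of_numbers_once_in_matrix := by
  intro matrix _
  unfold Spec_max_of_numbers_once_in_matrix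
  cases hB : max_of_numbers_once_in_matrix_alt matrix with
  | none =>
    rw [A_none_iff]
    exact (B_none_iff matrix).mp hB
  | some m =>
    rw [A_some_iff]
    exact B_some matrix m hB
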